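-- pv_equiv track=rewrite | github.com/DylanTech2025/AdventOfCode | 2025/src/day9.py | check
-- ===== SOURCE A (Python) =====
-- def check(shape:set, x1,y1,x2,y2) -> bool:
--     x1,x2 = sorted([x1,x2])
--     y1,y2 = sorted([y1,y2])
--
--     for x in range(x1,x2+1):
--         for y in range(y1,y2+1):
--             if not (x,y) in shape:
--                 return False
--
--     return True
-- ===== SOURCE B (Python) =====
-- def check(shape: set, x1, y1, x2, y2) -> bool:
--     lo_x, hi_x = min(x1, x2), max(x1, x2)
--     lo_y, hi_y = min(y1, y2), max(y1, y2)
--     area = (hi_x - lo_x + 1) * (hi_y - lo_y + 1)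
--     inside = sum(1 for (px, py) in shape
--                  if lo_x <= px <= hi_x and lo_y <= py <= hi_y)
--     return inside == area
-- ===== Notes on version B (the rewrite author's own statement) =====
-- stated objective: alternative
-- what changed: Instead of scanning every lattice point of the rectangle and testing set membership, B makes one pass over the set, counts the points lying inside the rectangle, and compares the count with the rectangle's area; since the set holds distinct points, count == area iff every lattice point is present.
import Mathlib
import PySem

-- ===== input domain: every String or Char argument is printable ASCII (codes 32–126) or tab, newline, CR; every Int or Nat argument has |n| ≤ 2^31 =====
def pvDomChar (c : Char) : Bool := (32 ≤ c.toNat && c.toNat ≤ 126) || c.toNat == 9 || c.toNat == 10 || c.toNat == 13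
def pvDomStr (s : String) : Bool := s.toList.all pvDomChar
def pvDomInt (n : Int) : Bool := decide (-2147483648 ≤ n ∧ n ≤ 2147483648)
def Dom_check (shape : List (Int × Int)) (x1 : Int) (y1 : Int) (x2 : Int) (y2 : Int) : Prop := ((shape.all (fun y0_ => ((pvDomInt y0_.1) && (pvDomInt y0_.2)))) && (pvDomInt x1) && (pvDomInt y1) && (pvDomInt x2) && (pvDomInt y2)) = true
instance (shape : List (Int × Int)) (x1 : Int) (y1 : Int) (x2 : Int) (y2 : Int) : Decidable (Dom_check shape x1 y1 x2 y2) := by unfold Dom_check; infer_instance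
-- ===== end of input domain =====

-- ===== PORT A =====
-- B changes the algorithm: it counts the set's points inside the rectangle and compares
-- with the area, instead of scanning every lattice point of the rectangle (objective: alternative).
-- the inner 'for y in range(c, d + 1)' loop, with Python's early 'return False'
def checkInner (shape : List (Int × Int)) (x : Int) (y stopY : Int) : Bool :=
  if y < stopY then
    if shape.contains (x, y) then checkInner shape x (y + 1) stopY else false
  else true
termination_by (stopY - y).toNat
decreasing_by omega

-- the outer 'for x in range(a, b + 1)' loop
def checkOuter (shape : List (Int × Int)) (x stopX : Int) (c stopY : Int) : Bool :=
  if x < stopX then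
    if checkInner shape x c stopY then checkOuter shape (x + 1) stopX c stopY else false
  else true
termination_by (stopX - x).toNat
decreasing_by omega

def check (shape : List (Int × Int)) (x1 : Int) (y1 : Int) (x2 : Int) (y2 : Int) : Bool :=
  match PySem.List.sorted [x1, x2] (fun v => v) false,
        PySem.List.sorted [y1, y2] (fun v => v) false with
  | [a, b], [c, d] => checkOuter shape a (b + 1) c (d + 1)
  | _, _ => false   -- unreachable: sorted of a two-element list has two elements

-- ===== PORT B =====
def check_alt (shape : List (Int × Int)) (x1 : Int) (y1 : Int) (x2 : Int) (y2 : Int) : Bool :=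
  let loX := min x1 x2
  let hiX := max x1 x2
  let loY := min y1 y2
  let hiY := max y1 y2
  let area : Int := (hiX - loX + 1) * (hiY - loY + 1)
  let inside : Int :=
    (shape.countP (fun p => decide (loX ≤ p.1 ∧ p.1 ≤ hiX ∧ loY ≤ p.2 ∧ p.2 ≤ hiY)) : Int)
  inside == area

-- ===== PRECONDITION & SPEC =====
-- Pre_ excludes lists with duplicate points: the 'shape' parameter is a Python set, whose
-- list encoding holds distinct elements; on a duplicate-bearing list B's count can double-count.
def Pre_check (shape : List (Int × Int)) (x1 : Int) (y1 : Int) (x2 : Int) (y2 : Int) : Prop :=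
  shape.Nodup
instance (shape : List (Int × Int)) (x1 : Int) (y1 : Int) (x2 : Int) (y2 : Int) : Decidable (Pre_check shape x1 y1 x2 y2) := by unfold Pre_check; infer_instance

def pvWitness_check : (List (Int × Int)) × Int × Int × Int × Int := ([(0, 0), (0, 1)], 0, 0, 0, 1)

def Spec_check (shape : List (Int × Int)) (x1 : Int) (y1 : Int) (x2 : Int) (y2 : Int) (out : Bool) : Prop := out = check_alt shape x1 y1 x2 y2
instance (shape : List (Int × Int)) (x1 : Int) (y1 : Int) (x2 : Int) (y2 : Int) (out : Bool) : Decidable (Spec_check shape x1 y1 x2 y2 out) := by unfold Spec_check; infer_instance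

-- ===== CLAIM (what is proved, stated in full; the proofs are below) =====
def Claim_equal_check : Prop := ∀ (shape : List (Int × Int)) (x1 : Int) (y1 : Int) (x2 : Int) (y2 : Int), Dom_check shape x1 y1 x2 y2 → Pre_check shape x1 y1 x2 y2 → Spec_check shape x1 y1 x2 y2 (check shape x1 y1 x2 y2)

-- ===== LEMMAS AND PROOFS =====

-- sorted of a two-element list is [min, max]
theorem sorted_pair (u v : Int) :
    PySem.List.sorted [u, v] (fun x => x) false = [min u v, max u v] := by
  apply PySem.List.sorted_id_eq_of_perm_of_pairwise
  · rcases le_total u v with h | h <;>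
      simp [h, List.Perm.swap]
  · simp

-- the inner loop checks every y of [y, stopY)
theorem checkInner_iff (shape : List (Int × Int)) (x y stopY : Int) :
    checkInner shape x y stopY = true ↔ ∀ z, y ≤ z → z < stopY → (x, z) ∈ shape := by
  fun_induction checkInner with
  | case1 y hlt hmem ih =>
    rw [ih]
    constructor
    · intro h z hz1 hz2
      rcases eq_or_lt_of_le hz1 with h' | h'
      · simpa [← h'] using List.contains_iff_mem.mp hmem
      · exact h z (by omega) hz2
    · intro h z hz1 hz2; exact h z (by omega) hz2
  | case2 y hlt hmem =>
    simp only [Bool.false_eq_true, false_iff]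
    intro h
    exact hmem (List.contains_iff_mem.mpr (h y le_rfl hlt))
  | case3 y hge =>
    simp only [true_iff]
    intro z hz1 hz2; omega

-- the outer loop checks every column of [x, stopX)
theorem checkOuter_iff (shape : List (Int × Int)) (x stopX c stopY : Int) :
    checkOuter shape x stopX c stopY = true ↔
      ∀ u, x ≤ u → u < stopX → checkInner shape u c stopY = true := by
  fun_induction checkOuter with
  | case1 x hlt hin ih =>
    rw [ih]
    constructor
    · intro h u hu1 hu2
      rcases eq_or_lt_of_le hu1 with h' | h'
      · exact h' ▸ hin
      · exact h u (by omega) hu2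
    · intro h u hu1 hu2; exact h u (by omega) hu2
  | case2 x hlt hin =>
    simp only [Bool.false_eq_true, false_iff]
    intro h
    exact hin (h x le_rfl hlt)
  | case3 x hge =>
    simp only [true_iff]
    intro u hu1 hu2; omega

-- A's nested scan is the membership statement over the rectangle
theorem check_eq_true_iff (shape : List (Int × Int)) (x1 y1 x2 y2 : Int) :
    check shape x1 y1 x2 y2 = true ↔
      ∀ x y, min x1 x2 ≤ x → x ≤ max x1 x2 → min y1 y2 ≤ y → y ≤ max y1 y2 →
        (x, y) ∈ shape := by
  unfold check
  rw [sorted_pair, sorted_pair]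
  rw [checkOuter_iff]
  constructor
  · intro h x y hx1 hx2 hy1 hy2
    exact (checkInner_iff shape x (min y1 y2) (max y1 y2 + 1)).mp
      (h x hx1 (by omega)) y hy1 (by omega)
  · intro h x hx1 hx2
    exact (checkInner_iff shape x (min y1 y2) (max y1 y2 + 1)).mpr
      (fun z hz1 hz2 => h x z hx1 (by omega) hz1 (by omega))

-- counting inside a Nodup list as a Finset intersection card
theorem countP_eq_inter_card (shape : List (Int × Int)) (a b c d : Int)
    (hnd : shape.Nodup) :
    shape.countP (fun p => decide (a ≤ p.1 ∧ p.1 ≤ b ∧ c ≤ p.2 ∧ p.2 ≤ d)) =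
      (shape.toFinset ∩ (Finset.Icc a b ×ˢ Finset.Icc c d)).card := by
  classical
  have h1 : shape.countP (fun p => decide (a ≤ p.1 ∧ p.1 ≤ b ∧ c ≤ p.2 ∧ p.2 ≤ d)) =
      (shape.filter (fun p => decide (a ≤ p.1 ∧ p.1 ≤ b ∧ c ≤ p.2 ∧ p.2 ≤ d))).length :=
    List.countP_eq_length_filter
  rw [h1]
  have hnd2 : (shape.filter (fun p => decide (a ≤ p.1 ∧ p.1 ≤ b ∧ c ≤ p.2 ∧ p.2 ≤ d))).Nodup :=
    hnd.filter _
  rw [← List.toFinset_card_of_nodup hnd2]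
  congr 1
  ext p
  simp [Finset.mem_inter, Finset.mem_product, and_assoc, and_comm, and_left_comm]

-- the main characterisation: count equals area iff the rectangle is contained in the set
theorem count_eq_area_iff (shape : List (Int × Int)) (a b c d : Int)
    (hab : a ≤ b) (hcd : c ≤ d) (hnd : shape.Nodup) :
    ((shape.countP (fun p => decide (a ≤ p.1 ∧ p.1 ≤ b ∧ c ≤ p.2 ∧ p.2 ≤ d)) : Int) =
        (b - a + 1) * (d - c + 1)) ↔
      ∀ x y, a ≤ x → x ≤ b → c ≤ y → y ≤ d → (x, y) ∈ shape := by
  classical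
  set R : Finset (Int × Int) := Finset.Icc a b ×ˢ Finset.Icc c d with hR
  have hcard : (R.card : Int) = (b - a + 1) * (d - c + 1) := by
    rw [hR, Finset.card_product, Int.card_Icc, Int.card_Icc]
    push_cast [Int.toNat_of_nonneg (by omega : (0:Int) ≤ b + 1 - a),
      Int.toNat_of_nonneg (by omega : (0:Int) ≤ d + 1 - c)]
    ring
  rw [countP_eq_inter_card shape a b c d hnd, ← hcard, Int.natCast_inj]
  constructor
  · intro h x y hx1 hx2 hy1 hy2
    have hsub : shape.toFinset ∩ R = R :=
      Finset.eq_of_subset_of_card_le Finset.inter_subset_right (le_of_eq h.symm)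
    have hmem : (x, y) ∈ R := by
      simp [hR, Finset.mem_product, hx1, hx2, hy1, hy2]
    have := (Finset.inter_eq_right.mp hsub) hmem
    simpa using this
  · intro h
    have hsub : R ⊆ shape.toFinset := by
      intro p hp
      rw [hR, Finset.mem_product, Finset.mem_Icc, Finset.mem_Icc] at hp
      simpa using h p.1 p.2 hp.1.1 hp.1.2 hp.2.1 hp.2.2
    rw [Finset.inter_eq_right.mpr hsub]

-- ===== VERDICT (by name: the statement is the Claim_ definition above) =====
theorem check_spec : Claim_equal_check := by
  intro shape x1 y1 x2 y2 _hDom hPre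
  unfold Spec_check
  rw [Bool.eq_iff_iff]
  rw [check_eq_true_iff]
  unfold check_alt
  simp only [beq_iff_eq]
  rw [count_eq_area_iff shape (min x1 x2) (max x1 x2) (min y1 y2) (max y1 y2)
    min_le_max min_le_max hPre]
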